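-- pv_equiv track=rewrite | github.com/JTuratkhan/Natural-language-processing-projects | mtg.py | model_generation
-- ===== SOURCE A (Python) =====
-- def build_ngram_model(tokens, n):
--     ngrams = [tuple(tokens[i:i+n]) for i in range(len(tokens) - n + 1)]
--     return ngrams
--
-- def model_generation(corpus, n):
--     model = {}
--     for i in range(1, n + 1):
--         ngrams = build_ngram_model(corpus, i)
--         for ngram in ngrams:
--             prefix, suffix = ngram[:-1], ngram[-1]
--             if prefix not in model:
--                 model[prefix] = []
--             model[prefix].append(suffix)
--     return model
-- ===== SOURCE B (Python) =====
-- def model_generation(corpus, n):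
--     # One positional sweep building a separate bucket dict per prefix length,
--     # merged in increasing prefix-length order at the end.
--     L = len(corpus)
--     K = min(n, L)
--     buckets = [{} for _ in range(max(K, 0))]
--     for p, word in enumerate(corpus):
--         for k in range(min(p + 1, K)):
--             buckets[k].setdefault(tuple(corpus[p - k:p]), []).append(word)
--     model = {}
--     for b in buckets:
--         model.update(b)
--     return model
-- ===== Notes on version B (the rewrite author's own statement) =====
-- stated objective: alternative
-- what changed: Replaces the n separate per-order passes (each materializing the full ngram list and re-slicing every ngram) with a single positional sweep over the corpus that feeds per-prefix-length bucket dicts, merged once at the end; the loop over orders is capped at min(n, len(corpus)) instead of iterating n times.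
import Mathlib
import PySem

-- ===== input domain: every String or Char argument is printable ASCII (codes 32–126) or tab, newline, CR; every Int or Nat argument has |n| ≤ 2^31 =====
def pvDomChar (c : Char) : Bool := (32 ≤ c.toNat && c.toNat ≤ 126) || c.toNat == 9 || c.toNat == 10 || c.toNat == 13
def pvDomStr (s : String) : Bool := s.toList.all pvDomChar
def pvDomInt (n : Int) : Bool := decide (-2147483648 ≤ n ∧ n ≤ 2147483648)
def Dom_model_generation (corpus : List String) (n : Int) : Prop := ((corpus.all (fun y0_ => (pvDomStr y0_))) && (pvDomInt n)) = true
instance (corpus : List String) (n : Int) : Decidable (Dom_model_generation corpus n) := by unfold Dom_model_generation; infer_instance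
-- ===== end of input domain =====

-- B replaces A's n per-order ngram passes with a single positional sweep into per-prefix-length
-- bucket dicts merged at the end (alternative decomposition, same exact output).


-- ===== PORT A =====
def model_generation (corpus : List String) (n : Int) : List (List String × List String) :=
  ((PySem.List.pyRange 1 (n + 1) 1).foldl (fun model i =>
      let ngrams := (PySem.List.pyRange 0 ((corpus.length : Int) - i + 1) 1).map
        (fun j => PySem.List.slice corpus (some j) (some (j + i)))
      ngrams.foldl (fun model ngram =>
        let pfx := PySem.List.slice ngram none (some (-1))
        -- ngram[-1]: exact, each ngram has length i ≥ 1 so index -1 never raises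
        let sfx := PySem.List.pyGetD ngram (-1) ""
        let model := if model.contains pfx then model else model.insert pfx []
        model.modify pfx [] (fun v => v ++ [sfx])) model)
    PySem.Dict.empty).items

-- ===== PORT B =====
def model_generation_alt (corpus : List String) (n : Int) : List (List String × List String) :=
  let K : Int := min n (corpus.length : Int)
  let buckets : List (PySem.Dict (List String) (List String)) :=
    List.replicate (max K 0).toNat PySem.Dict.empty
  let buckets := (PySem.List.enumerate corpus).foldl (fun bs pw =>
      (PySem.List.pyRange 0 (min (pw.1 + 1) K) 1).foldl (fun bs k =>
        -- buckets[k].setdefault(tuple(corpus[p-k:p]), []).append(word)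
        let key := PySem.List.slice corpus (some (pw.1 - k)) (some pw.1)
        bs.set k.toNat
          (((bs.getD k.toNat PySem.Dict.empty).setdefault key []).modify key [] (fun v => v ++ [pw.2]))) bs)
    buckets
  (buckets.foldl (fun m b => m.update b.items) PySem.Dict.empty).items

-- ===== PRECONDITION & SPEC =====
def Spec_model_generation (corpus : List String) (n : Int) (out : List (List String × List String)) : Prop := out = model_generation_alt corpus n
instance (corpus : List String) (n : Int) (out : List (List String × List String)) : Decidable (Spec_model_generation corpus n out) := by unfold Spec_model_generation; infer_instance

-- ===== CLAIM (what is proved, stated in full; the proofs are below) =====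
def Claim_equal_model_generation : Prop := ∀ (corpus : List String) (n : Int), Dom_model_generation corpus n → Spec_model_generation corpus n (model_generation corpus n)

-- ===== LEMMAS AND PROOFS =====

-- ── shared notions ──────────────────────────────────────────────────────────
-- the net effect of one "setdefault/append" step on the model dict
def pvMStep (m : PySem.Dict (List String) (List String)) (pr : List String) (w : String) :
    PySem.Dict (List String) (List String) :=
  m.modify pr [] (fun v => v ++ [w])

-- (prefix, suffix) pairs contributed by prefix length k, in position order
def pvOrderPairs (c : List String) (k : Nat) : List (List String × String) :=
  (List.range (c.length - k)).map (fun j => ((c.drop j).take k, c.getD (j + k) ""))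

def pvOrderD (c : List String) (k : Nat) : PySem.Dict (List String) (List String) :=
  (pvOrderPairs c k).foldl (fun m p => pvMStep m p.1 p.2) PySem.Dict.empty

-- the common normal form: items of prefix length 0, then 1, …, then K-1
def pvCanon (c : List String) (K : Nat) : List (List String × List String) :=
  (List.range K).flatMap (fun k => (pvOrderD c k).items)

-- ── generic dict lemmas for this file ───────────────────────────────────────
theorem pvGet?_mk_append {ν : Type} (a b : List (List String × ν)) (k : List String)
    (h : (PySem.Dict.mk a).contains k = false) :
    (PySem.Dict.mk (a ++ b) : PySem.Dict (List String) ν).get? k = (PySem.Dict.mk b).get? k := by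
  rw [PySem.Dict.contains_mk] at h
  have ha : a.find? (fun p => p.1 == k) = none :=
    List.find?_eq_none.mpr (fun p hp => by simpa using List.any_eq_false.mp h p hp)
  simp [PySem.Dict.get?, List.find?_append, ha]

theorem pvModify_append (a b : List (List String × List String)) (k : List String)
    (f : List String → List String) (h : (PySem.Dict.mk a).contains k = false) :
    (PySem.Dict.mk (a ++ b) : PySem.Dict (List String) (List String)).modify k [] f
      = PySem.Dict.mk (a ++ ((PySem.Dict.mk b).modify k [] f).items) := by
  have hgd : (PySem.Dict.mk (a ++ b) : PySem.Dict (List String) (List String)).getD k []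
      = (PySem.Dict.mk b : PySem.Dict (List String) (List String)).getD k [] := by
    simp [PySem.Dict.getD, pvGet?_mk_append a b k h]
  rw [PySem.Dict.contains_mk] at h
  have hmap : ∀ v : List String,
      a.map (fun p => if p.1 = k then (k, v) else p) = a := by
    intro v
    have hid : ∀ p ∈ a, (if p.1 = k then (k, v) else p) = id p := by
      intro p hp
      have := List.any_eq_false.mp h p hp
      simp only [beq_iff_eq] at this
      simp [this]
    rw [List.map_congr_left hid, List.map_id]
  simp only [PySem.Dict.modify, PySem.Dict.insert, PySem.Dict.contains_mk, hgd]
  by_cases hb : (b.any fun p => p.1 == k) = true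
  · simp [List.any_append, h, hb, List.map_append, hmap]
  · simp [List.any_append, h, hb, List.append_assoc]

theorem pvFoldl_mstep_append (l : List (List String × String))
    (a b : List (List String × List String))
    (h : ∀ p ∈ l, (PySem.Dict.mk a).contains p.1 = false) :
    l.foldl (fun m p => pvMStep m p.1 p.2) (PySem.Dict.mk (a ++ b))
      = PySem.Dict.mk (a ++ (l.foldl (fun m p => pvMStep m p.1 p.2) (PySem.Dict.mk b)).items) := by
  induction l generalizing b with
  | nil => simp
  | cons p l ih =>
    simp only [List.foldl_cons]
    rw [show pvMStep (PySem.Dict.mk (a ++ b)) p.1 p.2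
          = PySem.Dict.mk (a ++ ((pvMStep (PySem.Dict.mk b) p.1 p.2).items)) from
        pvModify_append a b p.1 _ (h p (by simp)),
      ih _ (fun q hq => h q (by simp [hq]))]

-- ── keys of the per-length dicts ────────────────────────────────────────────
theorem pvOrderPairs_key_len (c : List String) (k : Nat) (p : List String × String)
    (hp : p ∈ pvOrderPairs c k) : p.1.length = k := by
  unfold pvOrderPairs at hp
  obtain ⟨j, hj, rfl⟩ := List.mem_map.mp hp
  have hj' := List.mem_range.mp hj
  simp only [List.length_take, List.length_drop]
  omega

theorem pvOrderD_key_len (c : List String) (k : Nat) (pr : List String)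
    (hpr : pr ∈ (pvOrderD c k).keys) : pr.length = k := by
  unfold pvOrderD pvMStep at hpr
  rw [PySem.Dict.keys_foldl_modify_key (pvOrderPairs c k) (fun p => p.1) []
        (fun _ p => fun v => v ++ [p.2]) PySem.Dict.empty] at hpr
  rw [PySem.Dict.keys_empty] at hpr
  rw [show ([] : List (List String)) = PySem.Set.empty from rfl, PySem.Set.update_empty] at hpr
  have := PySem.Set.mem_ofList _ _ |>.mp hpr
  obtain ⟨q, hq, rfl⟩ := List.mem_map.mp this
  exact pvOrderPairs_key_len c k q hq

theorem pvOrderD_nodup_keys (c : List String) (k : Nat) : (pvOrderD c k).keys.Nodup := by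
  unfold pvOrderD pvMStep
  exact PySem.Dict.nodup_keys_foldl_modify_key (pvOrderPairs c k) (fun p => p.1) []
    (fun _ p => fun v => v ++ [p.2]) PySem.Dict.empty PySem.Dict.nodup_keys_empty

theorem pvCanon_key_len (c : List String) (K : Nat) (pr : List String)
    (hpr : pr ∈ (PySem.Dict.mk (pvCanon c K) : PySem.Dict (List String) (List String)).keys) :
    pr.length < K := by
  simp only [PySem.Dict.keys_mk] at hpr
  obtain ⟨q, hq, rfl⟩ := List.mem_map.mp hpr
  unfold pvCanon at hq
  obtain ⟨k, hk, hq'⟩ := List.mem_flatMap.mp hq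
  have hk' := List.mem_range.mp hk
  have : q.1 ∈ (pvOrderD c k).keys := by
    simp only [PySem.Dict.keys]
    exact List.mem_map.mpr ⟨q, hq', rfl⟩
  have := pvOrderD_key_len c k q.1 this
  omega

theorem pvCanon_not_contains (c : List String) (K : Nat) (pr : List String)
    (hlen : K ≤ pr.length) :
    (PySem.Dict.mk (pvCanon c K) : PySem.Dict (List String) (List String)).contains pr = false := by
  by_contra hc
  rw [Bool.not_eq_false, PySem.Dict.contains_mk, List.any_eq_true] at hc
  obtain ⟨p, hp, hpk⟩ := hc
  have hmem : pr ∈ (PySem.Dict.mk (pvCanon c K) : PySem.Dict (List String) (List String)).keys := by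
    simp only [PySem.Dict.keys_mk]
    exact List.mem_map.mpr ⟨p, hp, by simpa using hpk⟩
  have := pvCanon_key_len c K pr hmem
  omega

-- ── A-side ──────────────────────────────────────────────────────────────────
def pvPassA (c : List String) (i : Int) (m : PySem.Dict (List String) (List String)) :
    PySem.Dict (List String) (List String) :=
  ((PySem.List.pyRange 0 ((c.length : Int) - i + 1) 1).map
      (fun j => PySem.List.slice c (some j) (some (j + i)))).foldl
    (fun model ngram =>
      let pfx := PySem.List.slice ngram none (some (-1))
      let sfx := PySem.List.pyGetD ngram (-1) ""
      let model := if model.contains pfx then model else model.insert pfx []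
      model.modify pfx [] (fun v => v ++ [sfx])) m

theorem pvA_unfold (c : List String) (n : Int) :
    model_generation c n
      = ((PySem.List.pyRange 1 (n + 1) 1).foldl (fun m i => pvPassA c i m) PySem.Dict.empty).items := by
  rfl

theorem pvStepA_eq (m : PySem.Dict (List String) (List String)) (pr : List String) (w : String) :
    (if m.contains pr then m else m.insert pr []).modify pr [] (fun v => v ++ [w]) = pvMStep m pr w := by
  by_cases h : m.contains pr
  · simp [pvMStep, h]
  · simp only [Bool.not_eq_true] at h
    simp [pvMStep, h, PySem.Dict.modify, PySem.Dict.getD_insert_self,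
      PySem.Dict.insert_insert_self, PySem.Dict.getD_of_not_contains m _ h]

theorem pvPyRange_one_empty (a b : Int) (h : b ≤ a) : PySem.List.pyRange a b 1 = [] := by
  unfold PySem.List.pyRange
  simp only [if_neg (by norm_num : ¬ (1:Int) = 0)]
  rw [if_pos (by norm_num : (0:Int) < 1), if_neg (by omega : ¬ a < b)]
  simp

theorem pvPyRange_zero_empty (s : Int) (hs : s ≤ 0) : PySem.List.pyRange 0 s 1 = [] := by
  exact pvPyRange_one_empty 0 s hs

theorem pvTake_dropLast {α : Type} (xs : List α) (k : Nat) (h : k + 1 ≤ xs.length) :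
    (xs.take (k + 1)).dropLast = xs.take k := by
  rw [List.dropLast_eq_take, List.take_take, List.length_take]
  congr 1
  omega

theorem pvPyGetD_last {α : Type} (xs : List α) (d : α) (h : xs ≠ []) :
    PySem.List.pyGetD xs (-1) d = xs.getD (xs.length - 1) d := by
  have hl : 1 ≤ xs.length := List.length_pos_iff.mpr h
  simp only [PySem.List.pyGetD, PySem.List.pyGet?, PySem.List.pyIdx?]
  rw [if_neg (by omega), if_pos (by omega : -(xs.length : Int) ≤ -1)]
  simp [List.getD_eq_getElem?_getD]

theorem pvPassA_eq (c : List String) (k : Nat) (hk : k < c.length)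
    (m : PySem.Dict (List String) (List String)) :
    pvPassA c ((k : Int) + 1) m = (pvOrderPairs c k).foldl (fun m p => pvMStep m p.1 p.2) m := by
  unfold pvPassA pvOrderPairs
  have h1 : (c.length : Int) - ((k : Int) + 1) + 1 = ((c.length - k : Nat) : Int) := by
    push_cast [Nat.cast_sub (le_of_lt hk)]; ring
  rw [h1, PySem.List.pyRange_zero_natCast, List.foldl_map, List.foldl_map, List.foldl_map]
  apply PySem.List.foldl_congr_mem
  intro acc jn hjn
  have hjn' := List.mem_range.mp hjn
  have hle : k + 1 ≤ (c.drop jn).length := by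
    rw [List.length_drop]; omega
  have hk1 : ((k : Int) + 1) = ((k + 1 : Nat) : Int) := by push_cast; ring
  rw [hk1, PySem.List.slice_natCast_add]
  have hlen : ((c.drop jn).take (k+1)).length = k + 1 := by
    rw [List.length_take]; omega
  have hne : (c.drop jn).take (k+1) ≠ [] := by
    intro h0; rw [h0] at hlen; simp at hlen
  simp only [PySem.List.slice_to_neg_one, pvTake_dropLast (c.drop jn) k hle,
    pvPyGetD_last _ _ hne, hlen]
  have hsf : ((c.drop jn).take (k+1)).getD (k + 1 - 1) "" = c.getD (jn + k) "" := by
    simp only [Nat.add_sub_cancel, List.getD_eq_getElem?_getD, List.getElem?_take,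
      List.getElem?_drop, if_pos (Nat.lt_succ_self k)]
  rw [hsf]
  exact pvStepA_eq acc _ _

theorem pvPassA_id (c : List String) (i : Int) (hi : (c.length : Int) < i)
    (m : PySem.Dict (List String) (List String)) : pvPassA c i m = m := by
  unfold pvPassA
  rw [pvPyRange_zero_empty _ (by omega)]
  rfl

theorem pvA_main (c : List String) (m : Nat) :
    ((List.range m).foldl (fun md (t : Nat) => pvPassA c (1 + (t : Int)) md) PySem.Dict.empty).items
      = pvCanon c (min m c.length) := by
  induction m with
  | zero =>
    simp only [List.range_zero, List.foldl_nil, Nat.min_def]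
    simp [pvCanon]
    rfl
  | succ m ih =>
    rw [List.range_succ, List.foldl_append, List.foldl_cons, List.foldl_nil]
    by_cases hm : m < c.length
    · have hmin : min m c.length = m := by omega
      rw [show (1 : Int) + (m : Int) = (m : Int) + 1 from by ring, pvPassA_eq c m hm]
      set d := (List.range m).foldl (fun md (t : Nat) => pvPassA c (1 + (t : Int)) md)
        PySem.Dict.empty with hd
      have hdmk : d = PySem.Dict.mk (pvCanon c m) := by
        apply PySem.Dict.ext
        rw [← hmin]
        exact ih
      have hfresh : ∀ p ∈ pvOrderPairs c m,
          (PySem.Dict.mk (pvCanon c m) : PySem.Dict (List String) (List String)).contains p.1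
            = false := fun p hp =>
        pvCanon_not_contains c m p.1 (by rw [pvOrderPairs_key_len c m p hp])
      rw [hdmk, show (PySem.Dict.mk (pvCanon c m) : PySem.Dict (List String) (List String))
            = PySem.Dict.mk (pvCanon c m ++ []) from by simp,
        pvFoldl_mstep_append _ _ _ hfresh]
      show pvCanon c m ++ _ = pvCanon c (min (m + 1) c.length)
      rw [show min (m + 1) c.length = m + 1 from by omega]
      unfold pvCanon
      rw [List.range_succ, List.flatMap_append]
      simp only [List.flatMap_cons, List.flatMap_nil, List.append_nil, List.append_cancel_left_eq]
      rfl
    · rw [pvPassA_id c _ (by omega), ih,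
        show min (m + 1) c.length = min m c.length from by omega]

theorem pvPyRange_one_ofNat (n : Nat) :
    PySem.List.pyRange 1 ((n : Int) + 1) 1 = (List.range n).map (fun t : Nat => 1 + (t : Int)) := by
  unfold PySem.List.pyRange
  simp only [if_neg (by norm_num : ¬ (1:Int) = 0)]
  rw [if_pos (by norm_num : (0:Int) < 1)]
  by_cases hn : (1:Int) < (n:Int) + 1
  · rw [if_pos hn]
    have : ((n : Int) + 1 - 1 + 1 - 1) / 1 = (n : Int) := by
      rw [Int.ediv_one]; ring
    rw [this, Int.toNat_natCast]
    simp only [one_mul]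
  · rw [if_neg hn]
    have : n = 0 := by omega
    subst this
    simp

theorem pvA_canon (c : List String) (n : Int) :
    model_generation c n = pvCanon c ((min n (c.length : Int)).toNat) := by
  rw [pvA_unfold]
  by_cases hn : 1 ≤ n
  · rw [show (n : Int) + 1 = ((n.toNat : Nat) : Int) + 1 from by omega,
      pvPyRange_one_ofNat, List.foldl_map, pvA_main,
      show min n.toNat c.length = (min n (c.length : Int)).toNat from by omega]
  · rw [pvPyRange_one_empty 1 (n + 1) (by omega)]
    rw [show (min n (c.length : Int)).toNat = 0 from by omega]
    simp [pvCanon]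
    rfl

-- ── B-side ──────────────────────────────────────────────────────────────────
theorem pvBStep_eq (d : PySem.Dict (List String) (List String)) (key : List String) (w : String) :
    ((d.setdefault key []).modify key [] (fun v => v ++ [w])) = pvMStep d key w := by
  have hsd : d.setdefault key [] = if d.contains key then d else d.insert key [] := by
    by_cases h : d.contains key
    · simp [PySem.Dict.setdefault_of_contains d [] h, h]
    · simp only [Bool.not_eq_true] at h
      simp [PySem.Dict.setdefault_of_not_contains d [] h, h]
  rw [hsd]
  exact pvStepA_eq d key w

def pvInnerB (c : List String) (K : Int) (bs : List (PySem.Dict (List String) (List String)))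
    (p : Int) (w : String) : List (PySem.Dict (List String) (List String)) :=
  (PySem.List.pyRange 0 (min (p + 1) K) 1).foldl (fun bs k =>
    bs.set k.toNat
      (((bs.getD k.toNat PySem.Dict.empty).setdefault (PySem.List.slice c (some (p - k)) (some p)) []).modify
        (PySem.List.slice c (some (p - k)) (some p)) [] (fun v => v ++ [w]))) bs

theorem pvB_unfold (c : List String) (n : Int) :
    model_generation_alt c n
      = (((PySem.List.enumerate c).foldl (fun bs pw => pvInnerB c (min n (c.length : Int)) bs pw.1 pw.2)
            (List.replicate (max (min n (c.length : Int)) 0).toNat PySem.Dict.empty)).foldl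
          (fun m b => m.update b.items) PySem.Dict.empty).items := by
  rfl

theorem pvInnerB_length (c : List String) (K : Int) (bs : List (PySem.Dict (List String) (List String)))
    (p : Int) (w : String) : (pvInnerB c K bs p w).length = bs.length := by
  unfold pvInnerB
  generalize (PySem.List.pyRange 0 (min (p + 1) K) 1) = l
  induction l generalizing bs with
  | nil => rfl
  | cons k l ih => rw [List.foldl_cons, ih, List.length_set]

theorem pvSetFold_len (f : Nat → PySem.Dict (List String) (List String) → PySem.Dict (List String) (List String))
    (mn : Nat) (bs : List (PySem.Dict (List String) (List String))) :
    ((List.range mn).foldl (fun bs kn => bs.set kn (f kn (bs.getD kn PySem.Dict.empty))) bs).length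
      = bs.length := by
  induction mn with
  | zero => rfl
  | succ mn ih =>
    rw [List.range_succ, List.foldl_append, List.foldl_cons, List.foldl_nil, List.length_set, ih]

theorem pvSetFold (f : Nat → PySem.Dict (List String) (List String) → PySem.Dict (List String) (List String))
    (mn : Nat) (bs : List (PySem.Dict (List String) (List String))) :
    ∀ (j : Nat) (hj : j < bs.length),
    ((List.range mn).foldl (fun bs kn => bs.set kn (f kn (bs.getD kn PySem.Dict.empty))) bs)[j]?
      = some (if j < mn then f j (bs[j]'(by omega)) else bs[j]'(by omega)) := by
  induction mn with
  | zero =>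
    intro j hj
    simp [List.getElem?_eq_getElem hj]
  | succ mn ih =>
    intro j hj
    rw [List.range_succ, List.foldl_append, List.foldl_cons, List.foldl_nil]
    have hlen := pvSetFold_len f mn bs
    rw [List.getElem?_set]
    by_cases hjm : mn = j
    · subst hjm
      rw [if_pos rfl, if_pos (by omega)]
      have hgd : ((List.range mn).foldl
            (fun bs kn => bs.set kn (f kn (bs.getD kn PySem.Dict.empty))) bs).getD mn
            PySem.Dict.empty = bs[mn]'(by omega) := by
        rw [List.getD_eq_getElem?_getD, ih mn hj]
        simp
      rw [hgd, if_pos (by omega)]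
    · rw [if_neg hjm, ih j hj]
      by_cases hlt : j < mn
      · rw [if_pos hlt, if_pos (by omega)]
      · rw [if_neg hlt, if_neg (by omega)]

theorem pvInnerB_get (c : List String) (K : Int) (bs : List (PySem.Dict (List String) (List String)))
    (p : Int) (w : String) (j : Nat) (hj : j < bs.length) :
    (pvInnerB c K bs p w)[j]?
      = some (if (j : Int) < min (p + 1) K then
          pvMStep bs[j] (PySem.List.slice c (some (p - (j : Int))) (some p)) w
        else bs[j]) := by
  unfold pvInnerB
  by_cases hm : min (p + 1) K ≤ 0
  · rw [pvPyRange_zero_empty _ hm]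
    rw [List.foldl_nil, List.getElem?_eq_getElem hj, if_neg (by omega)]
  · have hm' : min (p + 1) K = (((min (p + 1) K).toNat : Nat) : Int) := by omega
    rw [hm', PySem.List.pyRange_zero_natCast, List.foldl_map]
    have := pvSetFold
      (fun kn d => ((d.setdefault (PySem.List.slice c (some (p - (kn : Int))) (some p)) []).modify
        (PySem.List.slice c (some (p - (kn : Int))) (some p)) [] (fun v => v ++ [w])))
      ((min (p + 1) K).toNat) bs j hj
    simp only [Int.toNat_natCast] at this ⊢
    rw [this, pvBStep_eq]
    by_cases hlt : j < (min (p + 1) K).toNat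
    · rw [if_pos hlt, if_pos (by omega)]
    · rw [if_neg hlt, if_neg (by omega)]

-- partial per-length dict after the sweep has processed positions < t
def pvPartial (c : List String) (j t : Nat) : PySem.Dict (List String) (List String) :=
  ((List.range (t - j)).map (fun q => ((c.drop q).take j, c.getD (q + j) ""))).foldl
    (fun m p => pvMStep m p.1 p.2) PySem.Dict.empty

theorem pvB_sweep (c : List String) (K : Int) (t : Nat)
    (ht : t ≤ c.length) :
    ((List.range t).foldl (fun bs (pn : Nat) => pvInnerB c K bs ((pn : Nat) : Int) (c.getD pn ""))
          (List.replicate K.toNat PySem.Dict.empty)).length = K.toNat ∧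
      ∀ j : Nat, (hj : j < ((List.range t).foldl (fun bs (pn : Nat) => pvInnerB c K bs ((pn : Nat) : Int) (c.getD pn ""))
          (List.replicate K.toNat PySem.Dict.empty)).length) →
        ((List.range t).foldl (fun bs (pn : Nat) => pvInnerB c K bs ((pn : Nat) : Int) (c.getD pn ""))
          (List.replicate K.toNat PySem.Dict.empty))[j] = pvPartial c j t := by
  induction t with
  | zero =>
    refine ⟨by simp, ?_⟩
    intro j hj
    simp only [List.range_zero, List.foldl_nil] at hj ⊢
    rw [List.getElem_replicate]
    simp [pvPartial]
  | succ t ih =>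
    obtain ⟨ihlen, ihget⟩ := ih (by omega)
    rw [List.range_succ, List.foldl_append, List.foldl_cons, List.foldl_nil]
    refine ⟨by rw [pvInnerB_length, ihlen], ?_⟩
    intro j hj
    have hjF : j < ((List.range t).foldl
        (fun bs (pn : Nat) => pvInnerB c K bs ((pn : Nat) : Int) (c.getD pn ""))
        (List.replicate K.toNat PySem.Dict.empty)).length := by
      rw [ihlen]
      rw [pvInnerB_length, ihlen] at hj
      exact hj
    have hjK : j < K.toNat := by rw [ihlen] at hjF; exact hjF
    have hsome := pvInnerB_get c K _ ((t : Nat) : Int) (c.getD t "") j hjF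
    have hgoal : (pvInnerB c K _ ((t : Nat) : Int) (c.getD t ""))[j]?
        = some ((pvInnerB c K _ ((t : Nat) : Int) (c.getD t ""))[j]'hj) :=
      List.getElem?_eq_getElem hj
    rw [hgoal] at hsome
    have heq := Option.some.inj hsome
    rw [heq, ihget j hjF]
    by_cases hle : j ≤ t
    · have hKpos : ((j : Nat) : Int) < K := by omega
      rw [if_pos (by omega)]
      have hcast : ((t : Nat) : Int) - ((j : Nat) : Int) = (((t - j : Nat) : Nat) : Int) := by
        push_cast [Nat.cast_sub hle]; ring
      have hcast2 : ((t : Nat) : Int) = (((t - j) + j : Nat) : Int) := by push_cast; omega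
      rw [hcast]
      conv_lhs => rw [hcast2]
      rw [show (((t - j) + j : Nat) : Int) = (((t - j : Nat)) : Int) + ((j : Nat) : Int) from by push_cast; ring]
      rw [PySem.List.slice_natCast_add]
      unfold pvPartial
      rw [show t + 1 - j = (t - j) + 1 from by omega, List.range_succ, List.map_append,
        List.foldl_append, List.map_cons, List.foldl_cons, List.map_nil, List.foldl_nil]
      rw [show (t - j) + j = t from by omega]
    · rw [if_neg (by omega)]
      unfold pvPartial
      rw [show t + 1 - j = t - j from by omega]

theorem pvMerge (c : List String) (K0 : Nat) :
    (((List.range K0).map (fun k => pvOrderD c k)).foldl (fun m b => m.update b.items)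
        PySem.Dict.empty).items = pvCanon c K0 := by
  induction K0 with
  | zero => simp [pvCanon]; rfl
  | succ K0 ih =>
    rw [List.range_succ, List.map_append, List.foldl_append, List.map_cons, List.foldl_cons,
      List.map_nil, List.foldl_nil]
    set acc := ((List.range K0).map (fun k => pvOrderD c k)).foldl
      (fun m b => m.update b.items) PySem.Dict.empty with hacc
    have haccmk : acc = PySem.Dict.mk (pvCanon c K0) := PySem.Dict.ext ih
    have h1 : ∀ a ∈ (pvOrderD c K0).items, acc.contains a.1 = false := by
      intro a ha
      rw [haccmk]
      apply pvCanon_not_contains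
      have : a.1 ∈ (pvOrderD c K0).keys := by
        simp only [PySem.Dict.keys]
        exact List.mem_map.mpr ⟨a, ha, rfl⟩
      rw [pvOrderD_key_len c K0 a.1 this]
    have h2 : ((pvOrderD c K0).items.map (fun a => a.1)).Nodup := pvOrderD_nodup_keys c K0
    unfold PySem.Dict.update
    rw [PySem.Dict.items_foldl_insert_fresh (pvOrderD c K0).items (fun a => a.1)
      (fun a => a.2) acc h1 h2, ih]
    unfold pvCanon
    rw [List.range_succ, List.flatMap_append]
    simp

theorem pvB_canon (c : List String) (n : Int) :
    model_generation_alt c n = pvCanon c ((min n (c.length : Int)).toNat) := by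
  rw [pvB_unfold]
  have hmax : (max (min n (c.length : Int)) 0).toNat = (min n (c.length : Int)).toNat := by omega
  rw [hmax]
  rw [PySem.List.enumerate_eq_map_pyRange c "", List.foldl_map,
    show PySem.List.len c = ((c.length : Nat) : Int) from rfl,
    PySem.List.pyRange_zero_natCast, List.foldl_map]
  simp only [PySem.List.pyGetD_natCast]
  obtain ⟨hlen, hget⟩ := pvB_sweep c (min n (c.length : Int)) c.length le_rfl
  have hlist : ((List.range c.length).foldl
      (fun bs (pn : Nat) => pvInnerB c (min n (c.length : Int)) bs ((pn : Nat) : Int) (c.getD pn ""))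
      (List.replicate (min n (c.length : Int)).toNat PySem.Dict.empty))
      = (List.range (min n (c.length : Int)).toNat).map (fun k => pvOrderD c k) := by
    apply List.ext_getElem
    · rw [hlen, List.length_map, List.length_range]
    · intro j h1 h2
      rw [hget j h1, List.getElem_map, List.getElem_range]
      rfl
  rw [hlist, pvMerge]


-- ===== VERDICT (by name: the statement is the Claim_ definition above) =====
theorem model_generation_spec : Claim_equal_model_generation := by
  intro c n _
  unfold Spec_model_generation
  rw [pvA_canon, pvB_canon]
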